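-- pv_equiv track=rewrite | github.com/cdmismatch/cdmismatch | code/utils_v2.py | CountAsnInTracePathList
-- ===== SOURCE A (Python) =====
-- def CountAsnInTracePathList(asn, trace_list):
--     max_count = 0
--     sel_asn = ''
--     for temp in asn.split('_'):
--         count = 0
--         for trace_as in trace_list:
--             if temp in trace_as.split('_'):
--                 count += 1
--         if count > max_count:
--             max_count = count
--             sel_asn = temp
--     return (sel_asn, max_count)
-- ===== SOURCE B (Python) =====
-- def CountAsnInTracePathList(asn, trace_list):
--     # Build once: for each ASN component, in how many traces it appears.
--     counts = {}
--     for trace in trace_list: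
--         for comp in dict.fromkeys(trace.split('_')):
--             counts[comp] = counts.get(comp, 0) + 1
--     sel_asn = ''
--     max_count = 0
--     for temp in asn.split('_'):
--         c = counts.get(temp, 0)
--         if c > max_count:
--             max_count = c
--             sel_asn = temp
--     return (sel_asn, max_count)
-- ===== Notes on version B (the rewrite author's own statement) =====
-- stated objective: alternative
-- what changed: B precomputes in one pass a dict mapping each ASN component to the number of traces containing it (deduplicating within each trace), then answers each candidate with a single lookup, instead of A's rescanning and resplitting every trace for every candidate; asymptotically O(T*L+P) vs O(P*T*L), but not measurably faster on the benchmarked inputs.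
import Mathlib
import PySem

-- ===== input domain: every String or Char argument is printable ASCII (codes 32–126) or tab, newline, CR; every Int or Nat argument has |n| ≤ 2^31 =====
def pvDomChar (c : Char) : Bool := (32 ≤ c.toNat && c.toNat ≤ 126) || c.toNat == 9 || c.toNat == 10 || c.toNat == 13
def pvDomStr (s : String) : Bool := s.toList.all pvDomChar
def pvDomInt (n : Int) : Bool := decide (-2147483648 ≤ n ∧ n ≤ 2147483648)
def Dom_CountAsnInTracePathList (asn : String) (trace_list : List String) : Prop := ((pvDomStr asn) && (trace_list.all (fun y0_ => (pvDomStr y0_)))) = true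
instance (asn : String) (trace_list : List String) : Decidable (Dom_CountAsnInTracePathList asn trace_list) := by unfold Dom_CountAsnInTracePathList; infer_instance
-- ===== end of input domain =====

-- B replaces A's per-candidate rescan of all traces by a single counting pass
-- over the traces plus one dict lookup per candidate (alternative algorithm).
-- ===== PORT A =====
-- s.split('_'): sep is the nonempty literal "_", so split? is always `some` and getD [] is exact
def pvSplitU (s : String) : List String := (PySem.Str.split? s "_").getD []

def CountAsnInTracePathList (asn : String) (trace_list : List String) : String × Int :=
  (pvSplitU asn).foldl
    (fun (st : String × Int) temp =>
      let count : Int := trace_list.foldl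
        (fun c trace_as => if temp ∈ pvSplitU trace_as then c + 1 else c) 0
      if count > st.2 then (temp, count) else st)
    ("", 0)

-- ===== PORT B =====
def CountAsnInTracePathList_alt (asn : String) (trace_list : List String) : String × Int :=
  let counts : PySem.Dict String Int := trace_list.foldl
    (fun d trace =>
      (PySem.List.dedup (pvSplitU trace)).foldl
        (fun d comp => d.insert comp (d.getD comp 0 + 1)) d)
    PySem.Dict.empty
  (pvSplitU asn).foldl
    (fun (st : String × Int) temp =>
      let c := counts.getD temp 0
      if c > st.2 then (temp, c) else st)
    ("", 0)

-- ===== PRECONDITION & SPEC =====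
def Spec_CountAsnInTracePathList (asn : String) (trace_list : List String) (out : String × Int) : Prop := out = CountAsnInTracePathList_alt asn trace_list
instance (asn : String) (trace_list : List String) (out : String × Int) : Decidable (Spec_CountAsnInTracePathList asn trace_list out) := by unfold Spec_CountAsnInTracePathList; infer_instance

-- ===== CLAIM (what is proved, stated in full; the proofs are below) =====
def Claim_equal_CountAsnInTracePathList : Prop := ∀ (asn : String) (trace_list : List String), Dom_CountAsnInTracePathList asn trace_list → Spec_CountAsnInTracePathList asn trace_list (CountAsnInTracePathList asn trace_list)

-- ===== LEMMAS AND PROOFS =====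

-- one increment pass: each inserted element bumps its stored count by its multiplicity
theorem pv_inc_getD (l : List String) (d : PySem.Dict String Int) (x : String) :
    (l.foldl (fun d c => d.insert c (d.getD c 0 + 1)) d).getD x 0
      = d.getD x 0 + (l.count x : Int) := by
  induction l generalizing d with
  | nil => simp
  | cons c cs ih =>
    simp only [List.foldl_cons, ih, PySem.Dict.getD_insert, List.count_cons]
    by_cases h : x = c
    · simp [h]
      ring
    · simp [h, Ne.symm h]

-- B's dict after the first pass stores, for each component, the number of traces containing it
theorem pv_counts_getD (tl : List String) (d : PySem.Dict String Int) (x : String) :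
    (tl.foldl (fun d trace =>
        (PySem.List.dedup (pvSplitU trace)).foldl
          (fun d comp => d.insert comp (d.getD comp 0 + 1)) d) d).getD x 0
      = d.getD x 0 + (tl.countP (fun t => decide (x ∈ pvSplitU t)) : Int) := by
  induction tl generalizing d with
  | nil => simp
  | cons t ts ih =>
    simp only [List.foldl_cons, ih, pv_inc_getD, List.countP_cons]
    by_cases h : x ∈ pvSplitU t
    · rw [List.count_eq_one_of_mem (PySem.List.nodup_dedup _)
        ((PySem.List.mem_dedup _ _).mpr h)]
      simp [h]; omega
    · rw [List.count_eq_zero_of_not_mem (fun hm => h ((PySem.List.mem_dedup _ _).mp hm))]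
      simp [h]

-- ===== VERDICT (by name: the statement is the Claim_ definition above) =====
theorem CountAsnInTracePathList_spec : Claim_equal_CountAsnInTracePathList := by
  intro asn trace_list _
  unfold Spec_CountAsnInTracePathList CountAsnInTracePathList CountAsnInTracePathList_alt
  refine PySem.List.foldl_congr_mem _ _ _ _ ?_
  intro acc temp _
  have hA : trace_list.foldl
      (fun c trace_as => if temp ∈ pvSplitU trace_as then c + 1 else c) 0
      = (trace_list.countP (fun t => decide (temp ∈ pvSplitU t)) : Int) := by
    simpa using PySem.List.foldl_count_if
      (fun t => decide (temp ∈ pvSplitU t)) trace_list 0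
  have hB := pv_counts_getD trace_list PySem.Dict.empty temp
  simp only [hA, hB]
  simp
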